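-- pv_equiv track=rewrite | github.com/Hansolllll/algo | programmers/1.입문/겹치는선분의길이/sol.py | solution
-- ===== SOURCE A (Python) =====
-- def solution(lines):
--     numbers = []
--     # 시작점을 기준으로 길이가 1인 선분을 튜플형태로 만들어서 numbers에 추가
--     for i in range(len(lines)):
--         for num in range(lines[i][0], lines[i][-1]):
--             numbers.append((num, num+1))
--
--     scope= []
--     # numbers안에서 2번 이상 중복되는 선분 중 한번만 scope에 추가하기
--     for _ in numbers:
--         if numbers.count(_) >= 2 and _ not in scope:
--             scope.append(_)
--
--     # scope의 원소갯수 return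
--     return len(scope)
-- ===== SOURCE B (Python) =====
-- def solution(lines):
--     # sweep line: sort endpoint events, accumulate length while >= 2 segments active
--     events = []
--     for seg in lines:
--         if seg[0] < seg[-1]:
--             events.append((seg[0], 1))
--             events.append((seg[-1], -1))
--     events.sort(key=lambda e: e[0])
--     total = 0
--     active = 0
--     prev = 0
--     for pos, delta in events:
--         if active >= 2:
--             total += pos - prev
--         active += delta
--         prev = pos
--     return total
-- ===== Notes on version B (the rewrite author's own statement) =====
-- stated objective: faster
-- what changed: Replaces A's expansion of every segment into unit intervals followed by a quadratic duplicate count with an endpoint sweep line: sort the 2n start/end events and sum the gap lengths while at least two segments are active.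
import Mathlib
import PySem

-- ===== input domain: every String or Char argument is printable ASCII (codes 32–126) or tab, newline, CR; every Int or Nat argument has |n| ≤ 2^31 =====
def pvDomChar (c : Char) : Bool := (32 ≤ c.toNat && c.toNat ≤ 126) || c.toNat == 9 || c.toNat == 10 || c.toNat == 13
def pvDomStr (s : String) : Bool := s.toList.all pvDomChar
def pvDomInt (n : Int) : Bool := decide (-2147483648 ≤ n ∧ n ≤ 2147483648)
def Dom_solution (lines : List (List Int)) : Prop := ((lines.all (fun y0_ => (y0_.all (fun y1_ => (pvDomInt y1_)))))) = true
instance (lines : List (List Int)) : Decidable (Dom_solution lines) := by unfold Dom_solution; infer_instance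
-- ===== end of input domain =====

-- B replaces A's unit-interval expansion + quadratic duplicate count by an
-- endpoint sweep line (sort events, sum gaps while ≥ 2 segments are active);
-- the proof is about the return value only.

-- ===== PORT A =====
def solution (lines : List (List Int)) : Int :=
  let numbers : List (Int × Int) :=
    lines.foldl (fun acc seg =>
      acc ++ (PySem.List.pyRange ((PySem.List.pyGet? seg 0).getD 0)
                ((PySem.List.pyGet? seg (-1)).getD 0) 1).map (fun num => (num, num + 1))) []
  let scope : List (Int × Int) :=
    numbers.foldl (fun sc t =>
      if PySem.List.count numbers t ≥ 2 ∧ t ∉ sc then sc ++ [t] else sc) []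
  (scope.length : Int)

-- ===== PORT B =====
def solution_alt (lines : List (List Int)) : Int :=
  let events : List (Int × Int) :=
    lines.foldl (fun acc seg =>
      if ((PySem.List.pyGet? seg 0).getD 0 : Int) < (PySem.List.pyGet? seg (-1)).getD 0 then
        acc ++ [(((PySem.List.pyGet? seg 0).getD 0 : Int), (1 : Int)),
                (((PySem.List.pyGet? seg (-1)).getD 0 : Int), (-1 : Int))]
      else acc) []
  let evs := PySem.List.sorted events (fun e => e.1) false
  let r : Int × Int × Int :=
    evs.foldl (fun st e =>
      let total := if st.2.1 ≥ 2 then st.1 + (e.1 - st.2.2) else st.1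
      (total, st.2.1 + e.2, e.1)) (0, 0, 0)
  r.1

-- ===== PRECONDITION & SPEC =====
-- Pre_ excludes empty inner lists, on which Python A raises IndexError (seg[0]).
def Pre_solution (lines : List (List Int)) : Prop := ∀ seg ∈ lines, seg ≠ []
instance (lines : List (List Int)) : Decidable (Pre_solution lines) := by unfold Pre_solution; infer_instance
def pvWitness_solution : List (List Int) := [[1, 4], [3, 6]]
def Spec_solution (lines : List (List Int)) (out : Int) : Prop := out = solution_alt lines
instance (lines : List (List Int)) (out : Int) : Decidable (Spec_solution lines out) := by unfold Spec_solution; infer_instance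

-- ===== CLAIM (what is proved, stated in full; the proofs are below) =====
def Claim_equal_solution : Prop := ∀ (lines : List (List Int)), Dom_solution lines → Pre_solution lines → Spec_solution lines (solution lines)
-- ===== LEMMAS AND PROOFS =====

-- abbreviations for the two endpoints (proof-only)
def pvS (seg : List Int) : Int := (PySem.List.pyGet? seg 0).getD 0
def pvE (seg : List Int) : Int := (PySem.List.pyGet? seg (-1)).getD 0
lemma pvS_eq (seg : List Int) : (PySem.List.pyGet? seg 0).getD 0 = pvS seg := rfl
lemma pvE_eq (seg : List Int) : (PySem.List.pyGet? seg (-1)).getD 0 = pvE seg := rfl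

-- recursive form of B's sweep loop and the final event position
def pvSweep : List (Int × Int) → Int → Int → Int
  | [], _, _ => 0
  | (q, d) :: t, a, p => (if a ≥ 2 then q - p else 0) + pvSweep t (a + d) q

def pvLast : List (Int × Int) → Int → Int
  | [], p => p
  | (q, _) :: t, _ => pvLast t q

-- sum of deltas of events at positions ≤ x ("active count at unit point x")
def pvG (evs : List (Int × Int)) (x : Int) : Int :=
  ((evs.filter (fun e => decide (e.1 ≤ x))).map Prod.snd).sum

lemma pv_foldl_sweep (evs : List (Int × Int)) (t a p : Int) :
    (evs.foldl (fun st (e : Int × Int) =>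
      ((if st.2.1 ≥ 2 then st.1 + (e.1 - st.2.2) else st.1), st.2.1 + e.2, e.1)) (t, a, p)).1
    = t + pvSweep evs a p := by
  induction evs generalizing t a p with
  | nil => simp [pvSweep]
  | cons e tl ih =>
    obtain ⟨q, d⟩ := e
    simp only [List.foldl_cons, pvSweep, ih]
    by_cases h : a ≥ 2 <;> simp [h] <;> ring

lemma pv_last_bounds (evs : List (Int × Int)) (p : Int)
    (hs : evs.Pairwise (fun a b => a.1 ≤ b.1)) (hp : ∀ e ∈ evs, p ≤ e.1) :
    p ≤ pvLast evs p ∧ ∀ e ∈ evs, e.1 ≤ pvLast evs p := by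
  induction evs generalizing p with
  | nil => simp [pvLast]
  | cons e tl ih =>
    obtain ⟨q, d⟩ := e
    obtain ⟨h1, h2⟩ := List.pairwise_cons.mp hs
    have hpq : p ≤ q := hp _ List.mem_cons_self
    obtain ⟨ha, hb⟩ := ih q h2 (fun e he => h1 e he)
    have hl : pvLast ((q, d) :: tl) p = pvLast tl q := rfl
    rw [hl]
    refine ⟨le_trans hpq ha, ?_⟩
    intro e he
    rcases List.mem_cons.mp he with rfl | h
    · exact ha
    · exact hb e h

lemma pvG_cons_lt (q d x : Int) (tl : List (Int × Int)) (hx : x < q)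
    (htl : ∀ e ∈ tl, q ≤ e.1) : pvG ((q, d) :: tl) x = 0 := by
  have : ((q, d) :: tl).filter (fun e => decide (e.1 ≤ x)) = [] := by
    rw [List.filter_eq_nil_iff]
    intro e he
    rcases List.mem_cons.mp he with rfl | h
    · simp
      omega
    · have := htl e h
      simp
      omega
  simp [pvG, this]

lemma pvG_cons_le (q d x : Int) (tl : List (Int × Int)) (hx : q ≤ x) :
    pvG ((q, d) :: tl) x = d + pvG tl x := by
  simp [pvG, hx]

-- the sweep computes the number of unit points with active count ≥ 2
lemma pv_sweep_count (evs : List (Int × Int)) (a p : Int)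
    (hs : evs.Pairwise (fun a b => a.1 ≤ b.1)) (hp : ∀ e ∈ evs, p ≤ e.1) :
    pvSweep evs a p
      = ((PySem.List.pyRange p (pvLast evs p) 1).countP
          (fun x => decide (2 ≤ a + pvG evs x)) : Int) := by
  induction evs generalizing a p with
  | nil => simp [pvSweep, pvLast, PySem.List.pyRange_one_eq_nil le_rfl]
  | cons e tl ih =>
    obtain ⟨q, d⟩ := e
    obtain ⟨h1, h2⟩ := List.pairwise_cons.mp hs
    have hpq : p ≤ q := hp _ List.mem_cons_self
    have hql : q ≤ pvLast tl q := (pv_last_bounds tl q h2 h1).1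
    have hlast : pvLast ((q, d) :: tl) p = pvLast tl q := rfl
    rw [show pvSweep ((q, d) :: tl) a p = (if a ≥ 2 then q - p else 0) + pvSweep tl (a + d) q from rfl,
        hlast, PySem.List.pyRange_one_append p q (pvLast tl q) hpq hql, List.countP_append,
        ih (a + d) q h2 h1]
    have hfirst : (PySem.List.pyRange p q 1).countP (fun x => decide (2 ≤ a + pvG ((q, d) :: tl) x))
        = (PySem.List.pyRange p q 1).countP (fun _ => decide (2 ≤ a)) := by
      refine List.countP_congr (fun x hx => ?_)
      have hxq : x < q := (PySem.List.mem_pyRange_one.mp hx).2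
      rw [pvG_cons_lt q d x tl hxq h1]
      simp
    have hsecond : (PySem.List.pyRange q (pvLast tl q) 1).countP
          (fun x => decide (2 ≤ a + pvG ((q, d) :: tl) x))
        = (PySem.List.pyRange q (pvLast tl q) 1).countP (fun x => decide (2 ≤ a + d + pvG tl x)) := by
      refine List.countP_congr (fun x hx => ?_)
      have hqx : q ≤ x := (PySem.List.mem_pyRange_one.mp hx).1
      rw [pvG_cons_le q d x tl hqx]
      simp only [decide_eq_true_eq]
      omega
    have hconst : (PySem.List.pyRange p q 1).countP (fun _ => decide (2 ≤ a))
        = if 2 ≤ a then (PySem.List.pyRange p q 1).length else 0 := by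
      split_ifs with hg
      · exact List.countP_eq_length.mpr (fun y _ => by simpa using hg)
      · exact List.countP_eq_zero.mpr (fun y _ => by simpa using hg)
    rw [hfirst, hsecond, hconst]
    have hlen : ((PySem.List.pyRange p q 1).length : Int) = q - p := by
      rw [PySem.List.length_pyRange_one]; omega
    split_ifs with hg <;> push_cast <;> omega

-- multiplicity of a unit point in A's expansion = number of segments covering it
lemma pv_count_points (lines : List (List Int)) (x : Int) :
    (lines.flatMap (fun seg => PySem.List.pyRange (pvS seg) (pvE seg) 1)).count x
      = lines.countP (fun seg => decide (pvS seg ≤ x ∧ x < pvE seg)) := by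
  induction lines with
  | nil => simp
  | cons seg tl ih =>
    rw [List.flatMap_cons, List.count_append, ih, List.countP_cons]
    have h : (PySem.List.pyRange (pvS seg) (pvE seg) 1).count x
        = if pvS seg ≤ x ∧ x < pvE seg then 1 else 0 := by
      by_cases hm : pvS seg ≤ x ∧ x < pvE seg
      · rw [if_pos hm,
            List.count_eq_one_of_mem (PySem.List.nodup_pyRange_one _ _)
              (PySem.List.mem_pyRange_one.mpr hm)]
      · rw [if_neg hm, List.count_eq_zero_of_not_mem]
        rw [PySem.List.mem_pyRange_one]
        exact hm
    rw [h]
    by_cases hc : pvS seg ≤ x ∧ x < pvE seg <;> simp [hc] <;> omega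

-- active count from the event list = number of segments covering the unit point
lemma pv_g_cov (lines : List (List Int)) (x : Int) :
    pvG ((lines.filter (fun seg => decide (pvS seg < pvE seg))).flatMap
          (fun seg => [(pvS seg, 1), (pvE seg, -1)])) x
      = (lines.countP (fun seg => decide (pvS seg ≤ x ∧ x < pvE seg)) : Int) := by
  induction lines with
  | nil => simp [pvG]
  | cons seg tl ih =>
    rw [List.countP_cons, List.filter_cons]
    by_cases hk : pvS seg < pvE seg
    · simp only [hk, decide_true, if_true, List.flatMap_cons]
      have happ : ∀ (l1 l2 : List (Int × Int)), pvG (l1 ++ l2) x = pvG l1 x + pvG l2 x := by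
        intro l1 l2; simp [pvG, List.filter_append]
      rw [happ, ih]
      have : pvG [(pvS seg, 1), (pvE seg, -1)] x
          = (if pvS seg ≤ x then (1:Int) else 0) + (if pvE seg ≤ x then (-1:Int) else 0) := by
        simp only [pvG, List.filter_cons, List.filter_nil]
        by_cases h1 : pvS seg ≤ x <;> by_cases h2 : pvE seg ≤ x <;> simp [h1, h2]
      rw [this]
      push_cast
      split_ifs with h1 h2 h3 <;> simp at * <;> omega
    · simp only [hk, decide_false, Bool.false_eq_true, if_false]
      rw [ih]
      have : ¬ (pvS seg ≤ x ∧ x < pvE seg) := by omega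
      simp [this]

-- ===== A-side characterization (dedup of duplicated unit segments) =====
lemma pv_f_inj : Function.Injective (fun n : Int => (n, n + 1)) := by
  intro a b h; simpa using congrArg Prod.fst h

lemma pv_add_map {α β : Type} [BEq α] [LawfulBEq α] [BEq β] [LawfulBEq β] {f : α → β}
    (hf : Function.Injective f) (acc : List α) (x : α) :
    PySem.Set.add (acc.map f) (f x) = (PySem.Set.add acc x).map f := by
  have hmem : (f x ∈ acc.map f) ↔ x ∈ acc := by
    constructor
    · rintro h
      obtain ⟨a, ha, he⟩ := List.mem_map.mp h
      exact (hf he) ▸ ha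
    · intro h; exact List.mem_map.mpr ⟨x, h, rfl⟩
  by_cases hx : x ∈ acc <;>
    simp [PySem.Set.add, PySem.Set.contains, hmem, hx]

lemma pv_foldl_add_map {α β : Type} [BEq α] [LawfulBEq α] [BEq β] [LawfulBEq β] (f : α → β)
    (hf : Function.Injective f) (l : List α) (acc : List α) :
    (l.map f).foldl PySem.Set.add (acc.map f) = (l.foldl PySem.Set.add acc).map f := by
  induction l generalizing acc with
  | nil => rfl
  | cons x t ih =>
    simp only [List.map_cons, List.foldl_cons, pv_add_map hf, ih]

lemma pv_ofList_map {α β : Type} [BEq α] [LawfulBEq α] [BEq β] [LawfulBEq β] (f : α → β)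
    (hf : Function.Injective f) (l : List α) :
    PySem.Set.ofList (l.map f) = (PySem.Set.ofList l).map f := by
  have := pv_foldl_add_map f hf l []
  simpa [PySem.Set.ofList_eq_foldl] using this

lemma pv_foldl_add_filter {α : Type} [BEq α] [LawfulBEq α] (p : α → Bool) (l acc : List α) :
    (l.filter p).foldl PySem.Set.add (acc.filter p) = (l.foldl PySem.Set.add acc).filter p := by
  induction l generalizing acc with
  | nil => rfl
  | cons x t ih =>
    by_cases hp : p x
    · have h : PySem.Set.add (acc.filter p) x = (PySem.Set.add acc x).filter p := by
        by_cases hx : x ∈ acc <;>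
          simp [PySem.Set.add, PySem.Set.contains, List.mem_filter, hx, hp, List.filter_append]
      simpa [List.filter_cons, hp, h] using ih (PySem.Set.add acc x)
    · have h : ((PySem.Set.add acc x).filter p) = acc.filter p := by
        by_cases hx : x ∈ acc <;>
          simp [PySem.Set.add, PySem.Set.contains, hx, List.filter_append, hp]
      have := ih (PySem.Set.add acc x)
      rw [h] at this
      simpa [List.filter_cons, hp] using this

lemma pv_ofList_filter {α : Type} [BEq α] [LawfulBEq α] (p : α → Bool) (l : List α) :
    PySem.Set.ofList (l.filter p) = (PySem.Set.ofList l).filter p := by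
  have := pv_foldl_add_filter p l []
  simpa [PySem.Set.ofList_eq_foldl] using this

-- A's scope loop is: first occurrences of the duplicated unit segments
lemma pv_A_loop (numbers : List (Int × Int)) :
    List.foldl (fun sc t => if PySem.List.count numbers t ≥ 2 ∧ t ∉ sc then sc ++ [t] else sc) [] numbers
    = PySem.Set.ofList (numbers.filter (fun t => decide (PySem.List.count numbers t ≥ 2))) := by
  rw [PySem.List.foldl_congr_mem _ _
        (fun sc t => if PySem.List.count numbers t ≥ 2 then PySem.Set.add sc t else sc) _
        (fun sc t _ => by
          by_cases h1 : PySem.List.count numbers t ≥ 2 <;>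
            by_cases h2 : t ∈ sc <;>
              simp [h2, PySem.Set.add, PySem.Set.contains]),
      PySem.List.foldl_ite_eq_foldl_filter, ← PySem.Set.ofList_eq_foldl]

-- A counts the distinct unit points covered by at least two segments
lemma pv_A_eq (lines : List (List Int)) :
    solution lines
      = (((PySem.Set.ofList (lines.flatMap (fun seg => PySem.List.pyRange (pvS seg) (pvE seg) 1))).filter
          (fun x => decide (2 ≤ (lines.countP (fun seg => decide (pvS seg ≤ x ∧ x < pvE seg)))))).length : Int) := by
  unfold solution
  dsimp only
  rw [PySem.List.foldl_append_eq_flatMap, List.nil_append, ← List.map_flatMap, pv_A_loop,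
      List.filter_map, pv_ofList_map _ pv_f_inj, List.length_map]
  simp only [pvS_eq, pvE_eq]
  rw [pv_ofList_filter]
  congr 2
  apply List.filter_congr
  intro x hx
  simp only [Function.comp_apply, PySem.List.count_eq, List.count_map_of_injective _ _ pv_f_inj,
    pv_count_points]

lemma pvG_perm {l1 l2 : List (Int × Int)} (h : l1.Perm l2) (x : Int) : pvG l1 x = pvG l2 x :=
  List.Perm.sum_eq (List.Perm.map _ (List.Perm.filter _ h))

-- the sweep over any sorted event list whose running deltas realize the coverage
-- counts exactly the distinct unit points covered at least twice
lemma pv_sweep_main (lines : List (List Int)) (evs : List (Int × Int))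
    (hpw : evs.Pairwise (fun a b => a.1 ≤ b.1))
    (hgcov : ∀ x : Int, pvG evs x
      = (lines.countP (fun seg => decide (pvS seg ≤ x ∧ x < pvE seg)) : Int))
    (hmem : ∀ seg ∈ lines, pvS seg < pvE seg →
      (pvS seg, (1 : Int)) ∈ evs ∧ (pvE seg, (-1 : Int)) ∈ evs) :
    pvSweep evs 0 0
      = (((PySem.Set.ofList (lines.flatMap (fun seg => PySem.List.pyRange (pvS seg) (pvE seg) 1))).filter
          (fun x => decide (2 ≤ (lines.countP (fun seg => decide (pvS seg ≤ x ∧ x < pvE seg)))))).length : Int) := by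
  cases evs with
  | nil =>
    have hzero : ∀ x : Int, lines.countP (fun seg => decide (pvS seg ≤ x ∧ x < pvE seg)) = 0 := by
      intro x
      have h := (hgcov x).symm
      simp only [pvG, List.filter_nil, List.map_nil, List.sum_nil] at h
      exact_mod_cast h
    have hflt : (PySem.Set.ofList (lines.flatMap (fun seg => PySem.List.pyRange (pvS seg) (pvE seg) 1))).filter
          (fun x => decide (2 ≤ (lines.countP (fun seg => decide (pvS seg ≤ x ∧ x < pvE seg))))) = [] :=
      List.filter_eq_nil_iff.mpr (fun x _ => by simp only [hzero x]; decide)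
    rw [hflt]
    simp [pvSweep]
  | cons e t =>
    obtain ⟨q, d⟩ := e
    obtain ⟨hhd, htl⟩ := List.pairwise_cons.mp hpw
    have hq_all : ∀ e ∈ (q, d) :: t, q ≤ e.1 := by
      intro e he
      rcases List.mem_cons.mp he with rfl | h
      · exact le_refl _
      · exact hhd e h
    have hsw : pvSweep ((q, d) :: t) 0 0 = pvSweep t (0 + d) q := by
      simp [pvSweep]
    rw [hsw, pv_sweep_count t (0 + d) q htl hhd]
    have hpred : (PySem.List.pyRange q (pvLast t q) 1).countP
          (fun x => decide (2 ≤ 0 + d + pvG t x))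
        = (PySem.List.pyRange q (pvLast t q) 1).countP
          (fun x => decide (2 ≤ (lines.countP (fun seg => decide (pvS seg ≤ x ∧ x < pvE seg))))) := by
      refine List.countP_congr (fun x hx => ?_)
      have hqx : q ≤ x := (PySem.List.mem_pyRange_one.mp hx).1
      have h1 : 0 + d + pvG t x = pvG ((q, d) :: t) x := by
        rw [pvG_cons_le q d x t hqx]; ring
      rw [h1, hgcov x]
      simp only [decide_eq_true_eq]
      exact ⟨fun h => by exact_mod_cast h, fun h => by exact_mod_cast h⟩
    rw [hpred]
    have hlastb := (pv_last_bounds ((q, d) :: t) q hpw hq_all).2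
    have hfin : ((PySem.Set.ofList (lines.flatMap (fun seg => PySem.List.pyRange (pvS seg) (pvE seg) 1))).filter
          (fun x => decide (2 ≤ (lines.countP (fun seg => decide (pvS seg ≤ x ∧ x < pvE seg)))))).length
        = (PySem.List.pyRange q (pvLast t q) 1).countP
          (fun x => decide (2 ≤ (lines.countP (fun seg => decide (pvS seg ≤ x ∧ x < pvE seg))))) := by
      rw [List.countP_eq_length_filter]
      apply List.Perm.length_eq
      rw [List.perm_ext_iff_of_nodup
            (List.Nodup.filter _ (PySem.Set.nodup_ofList _))
            (List.Nodup.filter _ (PySem.List.nodup_pyRange_one _ _))]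
      intro x
      simp only [List.mem_filter, decide_eq_true_eq]
      constructor
      · rintro ⟨-, hc⟩
        refine ⟨?_, hc⟩
        obtain ⟨seg, hsl, hp⟩ := List.countP_pos_iff.mp (by omega : 0 <
          lines.countP (fun seg => decide (pvS seg ≤ x ∧ x < pvE seg)))
        simp only [decide_eq_true_eq] at hp
        have hlt : pvS seg < pvE seg := by omega
        obtain ⟨hs_ev, he_ev⟩ := hmem seg hsl hlt
        have hqs : q ≤ pvS seg := by simpa using hq_all _ hs_ev
        have hEM : pvE seg ≤ pvLast t q := by simpa [pvLast] using hlastb _ he_ev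
        rw [PySem.List.mem_pyRange_one]
        omega
      · rintro ⟨-, hc⟩
        refine ⟨?_, hc⟩
        obtain ⟨seg, hsl, hp⟩ := List.countP_pos_iff.mp (by omega : 0 <
          lines.countP (fun seg => decide (pvS seg ≤ x ∧ x < pvE seg)))
        simp only [decide_eq_true_eq] at hp
        rw [PySem.Set.mem_ofList]
        exact List.mem_flatMap.mpr ⟨seg, hsl, PySem.List.mem_pyRange_one.mpr ⟨hp.1, hp.2⟩⟩
    rw [hfin]

-- B computes the same count of unit points covered at least twice
lemma pv_B_eq (lines : List (List Int)) :
    solution_alt lines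
      = (((PySem.Set.ofList (lines.flatMap (fun seg => PySem.List.pyRange (pvS seg) (pvE seg) 1))).filter
          (fun x => decide (2 ≤ (lines.countP (fun seg => decide (pvS seg ≤ x ∧ x < pvE seg)))))).length : Int) := by
  unfold solution_alt
  dsimp only
  rw [PySem.List.foldl_ite_eq_foldl_filter, PySem.List.foldl_append_eq_flatMap, List.nil_append]
  simp only [pvS_eq, pvE_eq]
  rw [pv_foldl_sweep, zero_add]
  refine pv_sweep_main lines _ (PySem.List.sorted_pairwise _ _) (fun x => ?_) (fun seg hs hlt => ?_)
  · rw [pvG_perm (PySem.List.sorted_perm _ _ false)]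
    exact pv_g_cov lines x
  · have hsegf : seg ∈ lines.filter (fun s => decide (pvS s < pvE s)) :=
      List.mem_filter.mpr ⟨hs, by simpa using hlt⟩
    constructor
    · exact (PySem.List.mem_sorted _ _ _ _).mpr (List.mem_flatMap.mpr ⟨seg, hsegf, by simp⟩)
    · exact (PySem.List.mem_sorted _ _ _ _).mpr (List.mem_flatMap.mpr ⟨seg, hsegf, by simp⟩)

theorem pv_main (lines : List (List Int)) : solution lines = solution_alt lines := by
  rw [pv_A_eq, pv_B_eq]

-- ===== VERDICT (by name: the statement is the Claim_ definition above) =====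
theorem solution_spec : Claim_equal_solution := by
  intro lines _ _
  unfold Spec_solution
  exact pv_main lines
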